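-- pv_equiv track=rewrite | github.com/ChakshuGupta/your-smart-home-can-t-keep-a-secret | src/fingerprint_extractor.py | get_protocol_string
-- ===== SOURCE A (Python) =====
-- def get_protocol_string(protocols):
--     """
--     Generate the protocols string using the method described in the paper
--     """
--     # default values of the protocols
--     ip, tcp, udp, tls, http, dns, other = "0", "0", "0", "0", "0", "0", "0"
--     protocol_list = protocols.split(":")
--     for proto in protocol_list:
--         if proto == "eth":
--             continue
--         elif proto == "ethertype":
--             continue
--         elif proto == "ip":
--             ip = "1"
--         elif proto == "tcp":
--             tcp = "1"
--         elif proto == "udp":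
--             udp = "1"
--         elif proto == "tls":
--             tls = "1"
--         elif proto == "http":
--             http = "1"
--         elif proto == "dns":
--             dns = "1"
--         else:
--             other = "1"
--
--     proto_str = ip + tcp + udp + tls + http + dns + other
--
--     return proto_str
-- ===== SOURCE B (Python) =====
-- def get_protocol_string(protocols):
--     """
--     Generate the protocols string using the method described in the paper
--     """
--     tokens = set(protocols.split(":"))
--     known = {"eth", "ethertype", "ip", "tcp", "udp", "tls", "http", "dns"}
--     parts = ["1" if p in tokens else "0" for p in ("ip", "tcp", "udp", "tls", "http", "dns")]
--     parts.append("1" if tokens - known else "0")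
--     return "".join(parts)
-- ===== Notes on version B (the rewrite author's own statement) =====
-- stated objective: idiomatic
-- what changed: Replaces the 9-way if/elif chain mutating seven flag variables with a token set built once: six flags come from membership tests over the fixed protocol list and the seventh flag from a set difference against the known names.
import Mathlib
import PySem

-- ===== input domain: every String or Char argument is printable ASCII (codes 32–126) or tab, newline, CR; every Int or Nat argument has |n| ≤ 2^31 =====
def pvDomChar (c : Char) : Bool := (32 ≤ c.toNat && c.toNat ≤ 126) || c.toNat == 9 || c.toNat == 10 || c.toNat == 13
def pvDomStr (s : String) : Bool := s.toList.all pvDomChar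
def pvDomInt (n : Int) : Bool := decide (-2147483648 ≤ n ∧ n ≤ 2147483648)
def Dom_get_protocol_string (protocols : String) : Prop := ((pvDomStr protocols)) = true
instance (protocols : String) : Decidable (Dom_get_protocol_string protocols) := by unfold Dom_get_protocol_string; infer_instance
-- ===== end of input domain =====

-- B replaces A's 9-way if/elif chain over seven mutable flags with a token set built once:
-- membership tests over the fixed protocol list plus a set difference for the seventh flag (idiomatic).


-- ===== PORT A =====
-- one iteration of A's for-loop: the if/elif chain over the seven flag variables
def pvStepA (st : String × String × String × String × String × String × String) (proto : String) :
    String × String × String × String × String × String × String :=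
  let (ip, tcp, udp, tls, http, dns, other) := st
  if proto = "eth" then (ip, tcp, udp, tls, http, dns, other)
  else if proto = "ethertype" then (ip, tcp, udp, tls, http, dns, other)
  else if proto = "ip" then ("1", tcp, udp, tls, http, dns, other)
  else if proto = "tcp" then (ip, "1", udp, tls, http, dns, other)
  else if proto = "udp" then (ip, tcp, "1", tls, http, dns, other)
  else if proto = "tls" then (ip, tcp, udp, "1", http, dns, other)
  else if proto = "http" then (ip, tcp, udp, tls, "1", dns, other)
  else if proto = "dns" then (ip, tcp, udp, tls, http, "1", other)
  else (ip, tcp, udp, tls, http, dns, "1")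

def get_protocol_string (protocols : String) : String :=
  let protocol_list : List String := (PySem.Chars.splitOn protocols.toList [':']).map String.mk
  let st := protocol_list.foldl pvStepA ("0", "0", "0", "0", "0", "0", "0")
  -- ip + tcp + udp + tls + http + dns + other, ported as "".join (Lean's String.append is kernel-opaque)
  PySem.Str.join "" [st.1, st.2.1, st.2.2.1, st.2.2.2.1, st.2.2.2.2.1, st.2.2.2.2.2.1, st.2.2.2.2.2.2]

-- ===== PORT B =====
def pvKnown : PySem.Set String :=
  PySem.Set.ofList ["eth", "ethertype", "ip", "tcp", "udp", "tls", "http", "dns"]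

def get_protocol_string_alt (protocols : String) : String :=
  let tokens : PySem.Set String :=
    PySem.Set.ofList ((PySem.Chars.splitOn protocols.toList [':']).map String.mk)
  let parts := (["ip", "tcp", "udp", "tls", "http", "dns"]).map
    (fun p => if PySem.Set.contains tokens p then "1" else "0")
  PySem.Str.join "" (parts ++ [if PySem.Set.diff tokens pvKnown = [] then "0" else "1"])

-- ===== PRECONDITION & SPEC =====
def Spec_get_protocol_string (protocols : String) (out : String) : Prop := out = get_protocol_string_alt protocols
instance (protocols : String) (out : String) : Decidable (Spec_get_protocol_string protocols out) := by unfold Spec_get_protocol_string; infer_instance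

-- ===== CLAIM (what is proved, stated in full; the proofs are below) =====
def Claim_equal_get_protocol_string : Prop := ∀ (protocols : String), Dom_get_protocol_string protocols → Spec_get_protocol_string protocols (get_protocol_string protocols)

-- ===== LEMMAS AND PROOFS =====

-- the raw name list behind pvKnown
def pvKnownL : List String := ["eth", "ethertype", "ip", "tcp", "udp", "tls", "http", "dns"]

-- a flag after the loop: "1" if the condition ever fired, else its incoming value
def pvUpd (x : String) (b : Bool) : String := if b then "1" else x

-- what A's loop computes, flag by flag
theorem pvLoopA_spec (l : List String) (ip tcp udp tls http dns other : String) :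
    l.foldl pvStepA (ip, tcp, udp, tls, http, dns, other) =
      (pvUpd ip (l.contains "ip"), pvUpd tcp (l.contains "tcp"), pvUpd udp (l.contains "udp"),
       pvUpd tls (l.contains "tls"), pvUpd http (l.contains "http"), pvUpd dns (l.contains "dns"),
       pvUpd other (l.any (fun p => !pvKnownL.contains p))) := by
  induction l generalizing ip tcp udp tls http dns other with
  | nil => simp [pvUpd]
  | cons p rest ih =>
    by_cases h1 : p = "eth"
    · simp [pvStepA, pvUpd, h1, ih, pvKnownL]
    by_cases h2 : p = "ethertype"
    · simp [pvStepA, pvUpd, h2, ih, pvKnownL]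
    by_cases h3 : p = "ip"
    · simp [pvStepA, pvUpd, h3, ih, pvKnownL]
    by_cases h4 : p = "tcp"
    · simp [pvStepA, pvUpd, h4, ih, pvKnownL]
    by_cases h5 : p = "udp"
    · simp [pvStepA, pvUpd, h5, ih, pvKnownL]
    by_cases h6 : p = "tls"
    · simp [pvStepA, pvUpd, h6, ih, pvKnownL]
    by_cases h7 : p = "http"
    · simp [pvStepA, pvUpd, h7, ih, pvKnownL]
    by_cases h8 : p = "dns"
    · simp [pvStepA, pvUpd, h8, ih, pvKnownL]
    · have g3 : ¬ "ip" = p := fun h => h3 h.symm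
      have g4 : ¬ "tcp" = p := fun h => h4 h.symm
      have g5 : ¬ "udp" = p := fun h => h5 h.symm
      have g6 : ¬ "tls" = p := fun h => h6 h.symm
      have g7 : ¬ "http" = p := fun h => h7 h.symm
      have g8 : ¬ "dns" = p := fun h => h8 h.symm
      simp [pvStepA, pvUpd, ih, pvKnownL, h1, h2, h3, h4, h5, h6, h7, h8, g3, g4, g5, g6, g7, g8]

-- B's membership test over the token set is membership in the split list
theorem pv_contains_ofList (l : List String) (p : String) :
    PySem.Set.contains (PySem.Set.ofList l) p = l.contains p := by
  simp [PySem.Set.contains, PySem.Set.mem_ofList]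

-- B's set difference is empty exactly when A never hits the final else branch of its chain
theorem pv_diff_empty (l : List String) :
    (PySem.Set.diff (PySem.Set.ofList l) pvKnown = []) ↔
      (l.any (fun p => !pvKnownL.contains p) = false) := by
  simp only [PySem.Set.diff, List.filter_eq_nil_iff, PySem.Set.mem_ofList,
    List.any_eq_false, Bool.not_eq_true', PySem.Set.contains]
  constructor
  · intro h p hp
    have := h p hp
    simpa [pvKnown, pvKnownL, List.contains_iff_mem, PySem.Set.mem_ofList] using this
  · intro h p hp
    have := h p hp
    simpa [pvKnown, pvKnownL, List.contains_iff_mem, PySem.Set.mem_ofList] using this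

-- the two bodies agree for every split result l
theorem pv_bodies_eq (l : List String) :
    (let st := l.foldl pvStepA ("0", "0", "0", "0", "0", "0", "0")
     PySem.Str.join "" [st.1, st.2.1, st.2.2.1, st.2.2.2.1, st.2.2.2.2.1, st.2.2.2.2.2.1, st.2.2.2.2.2.2]) =
    PySem.Str.join ""
      ((["ip", "tcp", "udp", "tls", "http", "dns"]).map
        (fun p => if PySem.Set.contains (PySem.Set.ofList l) p then "1" else "0") ++
       [if PySem.Set.diff (PySem.Set.ofList l) pvKnown = [] then "0" else "1"]) := by
  rw [pvLoopA_spec]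
  simp only [List.map_cons, List.map_nil, pv_contains_ofList, pvUpd]
  rcases h : l.any (fun p => !pvKnownL.contains p) with _ | _
  · have : PySem.Set.diff (PySem.Set.ofList l) pvKnown = [] := (pv_diff_empty l).mpr h
    simp [this]
  · have : ¬ (PySem.Set.diff (PySem.Set.ofList l) pvKnown = []) := by
      intro hc; rw [(pv_diff_empty l).mp hc] at h; cases h
    simp [this]

-- ===== VERDICT (by name: the statement is the Claim_ definition above) =====
theorem get_protocol_string_spec : Claim_equal_get_protocol_string := by
  intro protocols _
  unfold Spec_get_protocol_string get_protocol_string get_protocol_string_alt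
  exact pv_bodies_eq _
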